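-- pv_equiv track=rewrite | github.com/MGezault/Cours | DevPython/TP8b listes, dictionnaires, ensembles-20241108/troupeaux.py | reunion_troupeaux
-- ===== SOURCE A (Python) =====
-- def reunion_troupeaux(troupeau1, troupeau2):
--     """ Simule la réunion de deux troupeaux
--
--     Args:
--         troupeau1 (dict): un dictionnaire modélisant un premier troupeau {nom_animaux: nombre}
--         troupeau2 (dict): un dictionnaire modélisant un deuxième troupeau
--
--     Returns:
--         dict: le dictionnaire modélisant la réunion des deux troupeaux
--     """
--     troupeau=troupeau1.copy()
--     for (cle,val) in troupeau2.items():
--         if cle in troupeau: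
--             troupeau[cle] += val
--         else:
--             troupeau[cle]=val
--     return troupeau
-- ===== SOURCE B (Python) =====
-- def reunion_troupeaux(troupeau1, troupeau2):
--     """Fusion par dichotomie : on copie troupeau1 une fois, puis une fonction
--     recursive coupe la liste des animaux de troupeau2 en deux moities et
--     incorpore chaque moitie; un seul animal s'ajoute directement."""
--     fusion = dict(troupeau1)
--
--     def incorporer(items):
--         if len(items) == 1:
--             cle, val = items[0]
--             fusion[cle] = fusion.get(cle, 0) + val
--         elif items:
--             milieu = len(items) // 2
--             incorporer(items[:milieu])
--             incorporer(items[milieu:])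
--
--     incorporer(list(troupeau2.items()))
--     return fusion
-- ===== Notes on version B (the rewrite author's own statement) =====
-- stated objective: alternative
-- what changed: A merges with one linear if/else loop that tests membership and either adds or inserts; B merges by divide-and-conquer: a recursive helper splits troupeau2's item list in halves and incorporates each half, with a direct get-and-sum insertion of a single animal as base case.
import Mathlib
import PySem

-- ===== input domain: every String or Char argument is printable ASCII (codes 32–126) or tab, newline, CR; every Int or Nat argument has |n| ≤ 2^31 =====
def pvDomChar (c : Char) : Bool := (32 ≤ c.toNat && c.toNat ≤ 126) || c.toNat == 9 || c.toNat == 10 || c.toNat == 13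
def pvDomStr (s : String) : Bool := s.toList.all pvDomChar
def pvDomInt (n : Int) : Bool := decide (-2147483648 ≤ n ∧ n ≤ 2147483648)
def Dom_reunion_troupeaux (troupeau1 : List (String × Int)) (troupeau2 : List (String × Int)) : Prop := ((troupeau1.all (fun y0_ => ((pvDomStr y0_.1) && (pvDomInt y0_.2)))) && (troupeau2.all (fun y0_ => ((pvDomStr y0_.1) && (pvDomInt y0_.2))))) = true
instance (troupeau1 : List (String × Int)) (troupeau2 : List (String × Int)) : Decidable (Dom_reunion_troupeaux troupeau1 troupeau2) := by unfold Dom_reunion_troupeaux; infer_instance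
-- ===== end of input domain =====

-- B replaces A's single copy-then-mutate loop by a divide-and-conquer merge that splits
-- troupeau2 in halves and recursively merges each half (alternative decomposition, same cost class).


-- ===== PORT A =====
-- troupeau = troupeau1.copy(); for (cle,val) in troupeau2.items(): if cle in troupeau: troupeau[cle]+=val else: troupeau[cle]=val
def reunion_troupeaux (troupeau1 : List (String × Int)) (troupeau2 : List (String × Int)) : List (String × Int) :=
  (troupeau2.foldl
    (fun (troupeau : PySem.Dict String Int) (p : String × Int) =>
      if troupeau.contains p.1 then troupeau.modify p.1 0 (· + p.2)
      else troupeau.insert p.1 p.2)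
    (PySem.Dict.mk troupeau1)).items

-- ===== PORT B =====
-- fusion = dict(troupeau1); incorporer splits items in halves (items[:m]/items[m:] with
-- 0 ≤ m ≤ len are exactly List.take/List.drop) and incorporates each; Python's mutated
-- `fusion` is threaded here as the `fusion` argument. The structural `fuel`
-- (= items.length at the top call) only makes the recursion total; it is never
-- exhausted, since each half is strictly shorter.
def reunionAltGo (fuel : Nat) (fusion : PySem.Dict String Int) (items : List (String × Int)) : PySem.Dict String Int :=
  match fuel with
  | 0 => fusion
  | fuel + 1 =>
    if items.isEmpty then fusion
    else if items.length == 1 then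
      let p := items.headD ("", 0)
      fusion.insert p.1 (fusion.getD p.1 0 + p.2)
    else
      let milieu := items.length / 2
      reunionAltGo fuel (reunionAltGo fuel fusion (items.take milieu)) (items.drop milieu)

def reunion_troupeaux_alt (troupeau1 : List (String × Int)) (troupeau2 : List (String × Int)) : List (String × Int) :=
  (reunionAltGo troupeau2.length (PySem.Dict.mk troupeau1) troupeau2).items

-- ===== PRECONDITION & SPEC =====
def Spec_reunion_troupeaux (troupeau1 : List (String × Int)) (troupeau2 : List (String × Int)) (out : List (String × Int)) : Prop := out = reunion_troupeaux_alt troupeau1 troupeau2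
instance (troupeau1 : List (String × Int)) (troupeau2 : List (String × Int)) (out : List (String × Int)) : Decidable (Spec_reunion_troupeaux troupeau1 troupeau2 out) := by unfold Spec_reunion_troupeaux; infer_instance

-- ===== CLAIM (what is proved, stated in full; the proofs are below) =====
def Claim_equal_reunion_troupeaux : Prop := ∀ (troupeau1 : List (String × Int)) (troupeau2 : List (String × Int)), Dom_reunion_troupeaux troupeau1 troupeau2 → Spec_reunion_troupeaux troupeau1 troupeau2 (reunion_troupeaux troupeau1 troupeau2)

-- ===== LEMMAS AND PROOFS =====

-- A's loop body always equals a single insert of the summed count.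
theorem stepA_eq (d : PySem.Dict String Int) (p : String × Int) :
    (if d.contains p.1 then d.modify p.1 0 (· + p.2) else d.insert p.1 p.2)
      = d.insert p.1 (d.getD p.1 0 + p.2) := by
  by_cases h : d.contains p.1 = true
  · simp [h, PySem.Dict.modify]
  · rw [if_neg h, PySem.Dict.getD_of_not_contains d 0 (by simpa using h), zero_add]

-- With enough fuel, B's divide-and-conquer merge computes the same left fold as A's loop.
theorem reunionAltGo_eq_foldl (fuel : Nat) (items : List (String × Int))
    (fusion : PySem.Dict String Int) (hfuel : items.length ≤ fuel) :
    reunionAltGo fuel fusion items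
      = items.foldl (fun d p => d.insert p.1 (d.getD p.1 0 + p.2)) fusion := by
  induction fuel generalizing items fusion with
  | zero =>
    rw [reunionAltGo]
    rw [List.length_eq_zero_iff.mp (Nat.le_zero.mp hfuel)]
    rfl
  | succ fuel ih =>
    rw [reunionAltGo]
    by_cases h1 : items.isEmpty
    · simp_all [List.isEmpty_iff]
    · by_cases h2 : items.length == 1
      · rw [if_neg h1, if_pos h2]
        rcases items with _ | ⟨q, _ | ⟨r, t⟩⟩ <;> simp_all
      · rw [if_neg h1, if_neg h2]
        show reunionAltGo fuel (reunionAltGo fuel fusion (items.take (items.length / 2)))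
              (items.drop (items.length / 2)) = _
        have hlen : 2 ≤ items.length := by
          simp only [List.isEmpty_iff_length_eq_zero, beq_iff_eq] at h1 h2
          omega
        rw [ih (items.take (items.length / 2)) fusion
              (by rw [List.length_take]; omega),
            ih (items.drop (items.length / 2)) _
              (by rw [List.length_drop]; omega),
            ← List.foldl_append, List.take_append_drop]

-- ===== VERDICT (by name: the statement is the Claim_ definition above) =====
theorem reunion_troupeaux_spec : Claim_equal_reunion_troupeaux := by
  intro t1 t2 _hdom
  unfold Spec_reunion_troupeaux reunion_troupeaux reunion_troupeaux_alt
  rw [reunionAltGo_eq_foldl _ _ _ (Nat.le_refl _)]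
  have hfun : (fun (troupeau : PySem.Dict String Int) (p : String × Int) =>
      if troupeau.contains p.1 then troupeau.modify p.1 0 (· + p.2)
      else troupeau.insert p.1 p.2)
      = fun d p => d.insert p.1 (d.getD p.1 0 + p.2) :=
    funext fun d => funext fun p => stepA_eq d p
  rw [hfun]
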